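-- pv_equiv track=rewrite | github.com/arkutils/Purlovia | hexutils.py | accumulate_for_n
-- ===== SOURCE A (Python) =====
-- def accumulate_for_n(input, n):
--     a = 0
--     i = n
--     for v in input:
--         a += v
--         i -= 1
--         if i <= 0:
--             yield a
--             a = 0
--             i = n
-- ===== SOURCE B (Python) =====
-- def accumulate_for_n(input, n):
--     size = n if n >= 1 else 1
--     it = iter(input)
--     while True:
--         block = []
--         for v in it:
--             block.append(v)
--             if len(block) == size:
--                 break
--         if len(block) < size:
--             return
--         yield sum(block)
-- ===== Notes on version B (the rewrite author's own statement) =====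
-- stated objective: idiomatic
-- what changed: B batches the iterator into an explicit per-chunk buffer (clamping the block size to at least 1) and yields each buffer's sum, instead of A's running total with a countdown counter that is reset on each yield.
import Mathlib
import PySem

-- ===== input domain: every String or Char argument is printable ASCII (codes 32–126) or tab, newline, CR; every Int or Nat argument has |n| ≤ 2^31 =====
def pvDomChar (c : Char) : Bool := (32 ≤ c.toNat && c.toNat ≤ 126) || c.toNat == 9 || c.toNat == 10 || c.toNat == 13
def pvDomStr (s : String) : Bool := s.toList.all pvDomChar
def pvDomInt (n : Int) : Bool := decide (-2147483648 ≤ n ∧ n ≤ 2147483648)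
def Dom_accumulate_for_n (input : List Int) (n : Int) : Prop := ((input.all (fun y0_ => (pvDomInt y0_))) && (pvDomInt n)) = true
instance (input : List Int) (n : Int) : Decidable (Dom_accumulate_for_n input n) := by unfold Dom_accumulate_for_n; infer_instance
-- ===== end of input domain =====

-- B batches the list into explicit per-chunk buffers (block size clamped to ≥ 1) and emits each buffer's sum,
-- instead of A's running total with a countdown counter reset on every yield; same cost, more idiomatic shape.

-- ===== PORT A =====
-- the loop body of A: state (a, i, yielded-so-far)
def stepA (n : Int) (s : Int × Int × List Int) (v : Int) : Int × Int × List Int :=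
  let a := s.1 + v
  let i := s.2.1 - 1
  if i ≤ 0 then (0, n, s.2.2 ++ [a]) else (a, i, s.2.2)

def accumulate_for_n (input : List Int) (n : Int) : List Int :=
  (input.foldl (stepA n) ((0 : Int), n, ([] : List Int))).2.2

-- ===== PORT B =====
-- the while-loop of B: take one block of `size` elements; stop on a short block, else emit its sum
def altLoop (size : Nat) (hs : 0 < size) (xs : List Int) : List Int :=
  let block := xs.take size
  if _h : block.length < size then []
  else block.sum :: altLoop size hs (xs.drop size)
termination_by xs.length
decreasing_by
  simp only [block, List.length_take, List.length_drop] at *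
  omega

def accumulate_for_n_alt (input : List Int) (n : Int) : List Int :=
  altLoop (if n ≥ 1 then n.toNat else 1) (by split <;> omega) input

-- ===== PRECONDITION & SPEC =====
def Spec_accumulate_for_n (input : List Int) (n : Int) (out : List Int) : Prop := out = accumulate_for_n_alt input n
instance (input : List Int) (n : Int) (out : List Int) : Decidable (Spec_accumulate_for_n input n out) := by unfold Spec_accumulate_for_n; infer_instance

-- ===== CLAIM (what is proved, stated in full; the proofs are below) =====
def Claim_equal_accumulate_for_n : Prop := ∀ (input : List Int) (n : Int), Dom_accumulate_for_n input n → Spec_accumulate_for_n input n (accumulate_for_n input n)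

-- ===== LEMMAS AND PROOFS =====

theorem altLoop_eq (size : Nat) (hs : 0 < size) (xs : List Int) :
    altLoop size hs xs =
      if xs.length < size then []
      else (xs.take size).sum :: altLoop size hs (xs.drop size) := by
  rw [altLoop]
  simp only [List.length_take]
  split <;> split <;> first | rfl | omega

-- the port of B equals altLoop at any size provably equal to B's clamped block size
theorem alt_eq (input : List Int) (n : Int) (s : Nat) (hs : 0 < s)
    (h : (if n ≥ 1 then n.toNat else 1) = s) :
    accumulate_for_n_alt input n = altLoop s hs input := by
  unfold accumulate_for_n_alt
  subst h
  rfl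

-- A's fold from a mid-chunk state (pending sum a, i elements still wanted), n ≥ 1
theorem key_pos (n : Int) (hn : 1 ≤ n) (hsz : 0 < n.toNat) :
    ∀ (xs : List Int) (a i : Int) (out : List Int), 1 ≤ i →
      (xs.foldl (stepA n) (a, i, out)).2.2 =
        out ++ (if xs.length < i.toNat then []
                else (a + (xs.take i.toNat).sum) :: altLoop n.toNat hsz (xs.drop i.toNat)) := by
  intro xs
  induction xs with
  | nil =>
      intro a i out hi
      simp only [List.foldl_nil, List.length_nil]
      rw [if_pos (by omega)]
      simp
  | cons v rest ih =>
      intro a i out hi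
      simp only [List.foldl_cons, stepA]
      by_cases h1 : i - 1 ≤ 0
      · have hi1 : i = 1 := by omega
        subst hi1
        rw [if_pos h1, ih 0 n _ hn]
        simp only [Int.zero_add]
        rw [← altLoop_eq n.toNat hsz rest]
        have : ¬ ((v :: rest).length < (1 : Int).toNat) := by simp
        rw [if_neg this]
        simp
      · rw [if_neg h1, ih _ _ _ (by omega)]
        have h2 : i.toNat = (i - 1).toNat + 1 := by omega
        rw [h2]
        simp only [List.length_cons, List.take_succ_cons, List.drop_succ_cons, List.sum_cons]
        by_cases h3 : rest.length < (i - 1).toNat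
        · rw [if_pos h3, if_pos (by omega)]
        · rw [if_neg h3, if_neg (by omega)]
          simp [add_assoc]

-- A's fold when n ≤ 0: every element closes a chunk (the countdown is never positive)
theorem key_nonpos (n : Int) (hn : n ≤ 0) :
    ∀ (xs : List Int) (a i : Int) (out : List Int), i ≤ 1 →
      (xs.foldl (stepA n) (a, i, out)).2.2 =
        out ++ (match xs with
                | [] => []
                | v :: rest => (a + v) :: altLoop 1 Nat.one_pos rest) := by
  intro xs
  induction xs with
  | nil => intro a i out hi; simp
  | cons v rest ih =>
      intro a i out hi
      simp only [List.foldl_cons, stepA]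
      rw [if_pos (by omega), ih _ _ _ (by omega)]
      rw [List.append_assoc]
      congr 1
      cases rest with
      | nil => rw [altLoop_eq]; simp
      | cons w r2 =>
          rw [altLoop_eq 1 Nat.one_pos (w :: r2)]
          simp

-- ===== VERDICT (by name: the statement is the Claim_ definition above) =====
theorem accumulate_for_n_spec : Claim_equal_accumulate_for_n := by
  intro input n _
  unfold Spec_accumulate_for_n accumulate_for_n
  by_cases hn : 1 ≤ n
  · have hsz : 0 < n.toNat := by omega
    rw [alt_eq input n n.toNat hsz (by simp [hn]), key_pos n hn hsz input 0 n [] hn]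
    rw [altLoop_eq n.toNat hsz input]
    simp
  · rw [alt_eq input n 1 Nat.one_pos (by simp; omega),
        key_nonpos n (by omega) input 0 n [] (by omega)]
    cases input with
    | nil => rw [altLoop_eq]; simp
    | cons v rest =>
        rw [altLoop_eq 1 Nat.one_pos (v :: rest)]
        simp
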